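-- pv_equiv track=rewrite | github.com/XyzHuy/-DL-Fine-tuning-coding-model | data/solution/Solution1902.py | maxDepthBST
-- ===== SOURCE A (Python) =====
-- from typing import List
-- import bisect
--
-- def maxDepthBST(order: List[int]) -> int:
--     if not order:
--         return 0
--
--     sorted_list = []
--     depth = {}
--     max_depth = 0
--
--     for x in order:
--         idx = bisect.bisect_left(sorted_list, x)
--         predecessor = sorted_list[idx-1] if idx > 0 else None
--         successor = sorted_list[idx] if idx < len(sorted_list) else None
--
--         current_depth = 1
--         if predecessor is not None:
--             current_depth = max(current_depth, depth[predecessor] + 1)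
--         if successor is not None:
--             current_depth = max(current_depth, depth[successor] + 1)
--
--         depth[x] = current_depth
--         if current_depth > max_depth:
--             max_depth = current_depth
--
--         bisect.insort(sorted_list, x)
--
--     return max_depth
-- ===== SOURCE B (Python) =====
-- from typing import List
--
-- def maxDepthBST(order: List[int]) -> int:
--     if not order:
--         return 0
--     n = len(order)
--     svals = sorted(set(order))
--     m = len(svals)
--     rank = {}
--     for i, v in enumerate(svals):
--         rank[v] = i
--     first = {}
--     for j in range(n - 1, -1, -1):
--         first[order[j]] = j
--     prev = [i - 1 for i in range(m)]
--     nxt = [i + 1 for i in range(m)]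
--     # delete each distinct value at its first occurrence, in reverse insertion
--     # order; record each position's sorted neighbors among earlier elements
--     # (a repeated value is its own successor in the BST insertion)
--     nbr = {}
--     for j in range(n - 1, 0, -1):
--         x = order[j]
--         r = rank[x]
--         p = prev[r]
--         pv = svals[p] if p >= 0 else None
--         if first[x] < j:
--             nbr[j] = (pv, x)
--         else:
--             s = nxt[r]
--             nbr[j] = (pv, svals[s] if s < m else None)
--             if p >= 0:
--                 nxt[p] = s
--             if s < m:
--                 prev[s] = p
--     # forward depth DP
--     depth = {order[0]: 1}
--     ans = 1
--     for j in range(1, n):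
--         x = order[j]
--         pv, sv = nbr[j]
--         d = 1
--         if pv is not None:
--             d = max(d, depth.get(pv, 0) + 1)
--         if sv is not None:
--             d = max(d, depth.get(sv, 0) + 1)
--         depth[x] = d
--         if d > ans:
--             ans = d
--     return ans
-- ===== Notes on version B (the rewrite author's own statement) =====
-- stated objective: faster
-- what changed: Replaces the incremental sorted list with bisect/insort (Theta(n) list insertion per element) by one sort of the distinct values plus a doubly-linked list over sorted positions swept in reverse insertion order to precompute every element's earlier-neighbors (a repeated value is recorded as its own successor), followed by a forward depth DP.
import Mathlib
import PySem

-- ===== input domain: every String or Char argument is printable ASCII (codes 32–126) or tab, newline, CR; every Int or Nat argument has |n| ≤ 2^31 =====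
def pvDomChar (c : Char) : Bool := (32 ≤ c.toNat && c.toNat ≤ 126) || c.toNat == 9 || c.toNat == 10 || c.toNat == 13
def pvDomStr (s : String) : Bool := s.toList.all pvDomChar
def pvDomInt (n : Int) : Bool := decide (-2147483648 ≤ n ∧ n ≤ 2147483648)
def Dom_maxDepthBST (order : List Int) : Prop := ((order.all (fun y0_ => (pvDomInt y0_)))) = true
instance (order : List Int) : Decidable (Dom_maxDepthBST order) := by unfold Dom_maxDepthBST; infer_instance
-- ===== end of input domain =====

-- B replaces A's incremental bisect/insort sorted list (Θ(n) insertion each step) by one sort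
-- of the distinct values, a doubly-linked list over sorted positions swept in reverse insertion
-- order to precompute each element's earlier neighbors, and a forward depth DP.

-- ===== PORT A =====
-- the body of A's `for x in order` loop; state = (sorted_list, depth, max_depth)
def stepA_maxDepthBST (st : List Int × PySem.Dict Int Int × Int) (x : Int) :
    List Int × PySem.Dict Int Int × Int :=
  let sl := st.1
  let depth := st.2.1
  let idx := PySem.List.bisectLeft sl x
  -- sorted_list[idx-1] / sorted_list[idx]: the index is in range whenever the branch is
  -- taken (bisect_left ≤ len), so pyGet? is `some` exactly where Python returns
  let predecessor : Option Int := if 0 < idx then PySem.List.pyGet? sl ((idx : Int) - 1) else none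
  let successor : Option Int := if idx < sl.length then PySem.List.pyGet? sl (idx : Int) else none
  let cd0 : Int := 1
  -- depth[predecessor] / depth[successor]: the key is always present, so getD is exact
  let cd1 := match predecessor with
    | some p => max cd0 (depth.getD p 0 + 1)
    | none => cd0
  let cd2 := match successor with
    | some s => max cd1 (depth.getD s 0 + 1)
    | none => cd1
  -- bisect.insort inserts at the bisect_right position
  (PySem.List.insert sl (PySem.List.bisectRight sl x : Int) x,
   depth.insert x cd2,
   if cd2 > st.2.2 then cd2 else st.2.2)

def maxDepthBST (order : List Int) : Int :=
  if order = [] then 0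
  else (order.foldl stepA_maxDepthBST ([], PySem.Dict.empty, 0)).2.2

-- ===== PORT B =====
-- body of B's reverse loop, with j and x = order[j]; state = (prev, nxt, nbr)
def stepRev_maxDepthBST (svals : List Int) (rank first : PySem.Dict Int Int) (m : Int)
    (st : List Int × List Int × PySem.Dict Int (Option Int × Option Int)) (j x : Int) :
    List Int × List Int × PySem.Dict Int (Option Int × Option Int) :=
  let prev := st.1
  let nxt := st.2.1
  let nbr := st.2.2
  let r := rank.getD x 0                        -- rank[x]: key always present
  let p := PySem.List.pyGetD prev r (-1)        -- prev[r], 0 ≤ r < m: in range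
  -- svals[p]: in range whenever the branch is taken
  let pv : Option Int := if p ≥ 0 then PySem.List.pyGet? svals p else none
  if first.getD x 0 < j then                    -- first[x]: key always present
    (prev, nxt, nbr.insert j (pv, some x))
  else
    let s := PySem.List.pyGetD nxt r (-1)       -- nxt[r]
    let sv : Option Int := if s < m then PySem.List.pyGet? svals s else none
    (if s < m then prev.set s.toNat p else prev,  -- prev[s] = p, 0 ≤ s < m
     if p ≥ 0 then nxt.set p.toNat s else nxt,    -- nxt[p] = s, 0 ≤ p < m
     nbr.insert j (pv, sv))

-- body of B's forward loop, with j and x = order[j]; state = (depth, ans)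
def stepFwd_maxDepthBST (nbr : PySem.Dict Int (Option Int × Option Int))
    (st : PySem.Dict Int Int × Int) (j x : Int) : PySem.Dict Int Int × Int :=
  let depth := st.1
  let psv := nbr.getD j (none, none)            -- nbr[j]: key present for every j ≥ 1
  let d0 : Int := 1
  let d1 := match psv.1 with
    | some pv => max d0 (depth.getD pv 0 + 1)   -- depth.get(pv, 0)
    | none => d0
  let d2 := match psv.2 with
    | some sv => max d1 (depth.getD sv 0 + 1)   -- depth.get(sv, 0)
    | none => d1
  (depth.insert x d2, if d2 > st.2 then d2 else st.2)

def maxDepthBST_alt (order : List Int) : Int :=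
  if order = [] then 0
  else
    let n : Int := PySem.List.len order
    let svals := PySem.List.sorted (PySem.Set.ofList order) (fun v => v) false
    let m : Int := PySem.List.len svals
    let rank := (PySem.List.enumerate svals 0).foldl
      (fun (d : PySem.Dict Int Int) p => d.insert p.2 p.1) PySem.Dict.empty
    let first := (PySem.List.pyRange (n - 1) (-1) (-1)).foldl
      (fun (d : PySem.Dict Int Int) j => d.insert (PySem.List.pyGetD order j 0) j)
      PySem.Dict.empty
    let prev0 := (PySem.List.pyRange 0 m 1).map (fun i => i - 1)
    let nxt0 := (PySem.List.pyRange 0 m 1).map (fun i => i + 1)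
    let st1 := (PySem.List.pyRange (n - 1) 0 (-1)).foldl
      (fun st j => stepRev_maxDepthBST svals rank first m st j (PySem.List.pyGetD order j 0))
      (prev0, nxt0, (PySem.Dict.empty : PySem.Dict Int (Option Int × Option Int)))
    let nbr := st1.2.2
    let depth0 : PySem.Dict Int Int := PySem.Dict.empty.insert (PySem.List.pyGetD order 0 0) 1
    ((PySem.List.pyRange 1 n 1).foldl
      (fun st j => stepFwd_maxDepthBST nbr st j (PySem.List.pyGetD order j 0))
      (depth0, 1)).2

-- ===== PRECONDITION & SPEC =====
def Spec_maxDepthBST (order : List Int) (out : Int) : Prop := out = maxDepthBST_alt order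
instance (order : List Int) (out : Int) : Decidable (Spec_maxDepthBST order out) := by unfold Spec_maxDepthBST; infer_instance

-- ===== CLAIM (what is proved, stated in full; the proofs are below) =====
def Claim_equal_maxDepthBST : Prop := ∀ (order : List Int), Dom_maxDepthBST order → Spec_maxDepthBST order (maxDepthBST order)

-- ===== LEMMAS AND PROOFS =====

-- x's predecessor / successor among the previously inserted values p (a value that was already
-- inserted is its own successor: bisect_left lands on its copy in A's sorted list)
def pvPredV (p : List Int) (x : Int) : Option Int := (p.filter (fun y => y < x)).max?
def pvSuccV (p : List Int) (x : Int) : Option Int :=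
  if x ∈ p then some x else (p.filter (fun y => x < y)).min?

-- reference step: both programs compute this; state = (inserted-so-far, depth, max_depth)
def pvAbsStep (st : List Int × PySem.Dict Int Int × Int) (x : Int) :
    List Int × PySem.Dict Int Int × Int :=
  let c1 : Int := match pvPredV st.1 x with
    | some v => max 1 (st.2.1.getD v 0 + 1)
    | none => 1
  let c2 : Int := match pvSuccV st.1 x with
    | some v => max c1 (st.2.1.getD v 0 + 1)
    | none => c1
  (st.1 ++ [x], st.2.1.insert x c2, if c2 > st.2.2 then c2 else st.2.2)

lemma pvMem_iff_getElem {l : List Int} {b : Int} : b ∈ l ↔ ∃ (j : Nat) (hj : j < l.length), l[j] = b :=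
  List.mem_iff_getElem

lemma pvPred_of_spec (pre sl : List Int) (x : Int) (idx : Nat)
    (hperm : sl.Perm pre) (hle : sl.Pairwise (· ≤ ·))
    (hbelow : ∀ (j : Nat) (hj : j < sl.length), j < idx → sl[j] < x)
    (habove : ∀ (j : Nat) (hj : j < sl.length), idx ≤ j → x ≤ sl[j])
    (hlen : idx ≤ sl.length) :
    (if 0 < idx then PySem.List.pyGet? sl ((idx : Int) - 1) else none) = pvPredV pre x := by
  by_cases h0 : 0 < idx
  · have hi1 : idx - 1 < sl.length := by omega
    have hcast : ((idx : Int) - 1) = ((idx - 1 : Nat) : Int) := by omega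
    rw [if_pos h0, hcast, PySem.List.pyGet?_natCast, List.getElem?_eq_getElem hi1]
    symm
    rw [pvPredV, List.max?_eq_some_iff]
    constructor
    · rw [List.mem_filter]
      refine ⟨hperm.mem_iff.mp (List.getElem_mem hi1), by simpa using hbelow (idx-1) hi1 (by omega)⟩
    · intro b hb
      rw [List.mem_filter] at hb
      obtain ⟨hbmem, hblt⟩ := hb
      simp only [decide_eq_true_eq] at hblt
      obtain ⟨j, hj, hjb⟩ := pvMem_iff_getElem.mp (hperm.mem_iff.mpr hbmem)
      by_cases hji : j < idx
      · rcases Nat.lt_or_ge j (idx-1) with hj2 | hj2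
        · have := (List.pairwise_iff_getElem.mp hle) j (idx-1) hj hi1 hj2
          omega
        · have : j = idx - 1 := by omega
          subst this; omega
      · have := habove j hj (by omega); omega
  · rw [if_neg h0]
    symm
    rw [pvPredV, List.max?_eq_none_iff, List.filter_eq_nil_iff]
    intro b hbmem hblt
    simp only [decide_eq_true_eq] at hblt
    obtain ⟨j, hj, hjb⟩ := pvMem_iff_getElem.mp (hperm.mem_iff.mpr hbmem)
    have := habove j hj (by omega)
    omega

lemma pvSucc_of_spec (pre sl : List Int) (x : Int) (idx : Nat)
    (hperm : sl.Perm pre) (hle : sl.Pairwise (· ≤ ·))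
    (hbelow : ∀ (j : Nat) (hj : j < sl.length), j < idx → sl[j] < x)
    (habove : ∀ (j : Nat) (hj : j < sl.length), idx ≤ j → x ≤ sl[j])
    (hlen : idx ≤ sl.length) :
    (if idx < sl.length then PySem.List.pyGet? sl (idx : Int) else none) = pvSuccV pre x := by
  by_cases hx : x ∈ pre
  · -- x is already present: sl[idx] is x's first copy
    obtain ⟨j, hj, hjx⟩ := pvMem_iff_getElem.mp (hperm.mem_iff.mpr hx)
    have hjidx : idx ≤ j := by
      by_contra hcon
      have := hbelow j hj (by omega)
      omega
    have h0 : idx < sl.length := by omega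
    rw [if_pos h0, PySem.List.pyGet?_natCast, List.getElem?_eq_getElem h0]
    rw [pvSuccV, if_pos hx]
    congr 1
    have hxle : x ≤ sl[idx] := habove idx h0 (by omega)
    rcases Nat.lt_or_ge idx j with hij | hij
    · have := (List.pairwise_iff_getElem.mp hle) idx j h0 hj hij
      omega
    · have : idx = j := by omega
      subst this
      omega
  · rw [pvSuccV, if_neg hx]
    by_cases h0 : idx < sl.length
    · rw [if_pos h0, PySem.List.pyGet?_natCast, List.getElem?_eq_getElem h0]
      symm
      rw [List.min?_eq_some_iff]
      have hmemi : sl[idx] ∈ pre := hperm.mem_iff.mp (List.getElem_mem h0)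
      have hgt : x < sl[idx] := by
        have hge := habove idx h0 (by omega)
        rcases lt_or_eq_of_le hge with h | h
        · exact h
        · exact absurd (h ▸ hmemi) hx
      constructor
      · rw [List.mem_filter]
        exact ⟨hmemi, by simpa using hgt⟩
      · intro b hb
        rw [List.mem_filter] at hb
        obtain ⟨hbmem, hblt⟩ := hb
        simp only [decide_eq_true_eq] at hblt
        obtain ⟨j, hj, hjb⟩ := pvMem_iff_getElem.mp (hperm.mem_iff.mpr hbmem)
        by_cases hji : idx ≤ j
        · rcases Nat.lt_or_ge idx j with hj2 | hj2
          · have := (List.pairwise_iff_getElem.mp hle) idx j h0 hj hj2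
            omega
          · have : j = idx := by omega
            subst this; omega
        · have := hbelow j hj (by omega); omega
    · rw [if_neg h0]
      symm
      rw [List.min?_eq_none_iff, List.filter_eq_nil_iff]
      intro b hbmem hblt
      simp only [decide_eq_true_eq] at hblt
      obtain ⟨j, hj, hjb⟩ := pvMem_iff_getElem.mp (hperm.mem_iff.mpr hbmem)
      have := hbelow j hj (by omega)
      omega

lemma pvInsort (pre : List Int) (x : Int) :
    PySem.List.insert (PySem.List.sorted pre (fun v => v) false)
      ((PySem.List.bisectRight (PySem.List.sorted pre (fun v => v) false) x : Nat) : Int) x =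
    PySem.List.sorted (pre ++ [x]) (fun v => v) false := by
  have hle : (PySem.List.sorted pre (fun v => v) false).Pairwise (· ≤ ·) :=
    PySem.List.sorted_pairwise pre (fun v => v)
  have hperm : (PySem.List.sorted pre (fun v => v) false).Perm pre :=
    PySem.List.sorted_perm pre (fun v => v) false
  obtain ⟨hlen, hbelow, habove⟩ :=
    PySem.List.bisectRight_spec (PySem.List.sorted pre (fun v => v) false) x hle
  set sl := PySem.List.sorted pre (fun v => v) false
  set k := PySem.List.bisectRight sl x
  rw [PySem.List.insert_natCast sl k x hlen]
  have hmem_take : ∀ a ∈ sl.take k, a ≤ x := by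
    intro a ha
    obtain ⟨j, hj, hja⟩ := pvMem_iff_getElem.mp ha
    rw [List.length_take] at hj
    have hj' : j < sl.length := by omega
    rw [List.getElem_take] at hja
    have := hbelow j hj' (by omega)
    omega
  have hmem_drop : ∀ a ∈ sl.drop k, x < a := by
    intro a ha
    obtain ⟨j, hj, hja⟩ := pvMem_iff_getElem.mp ha
    rw [List.length_drop] at hj
    rw [List.getElem_drop] at hja
    exact hja ▸ habove (k + j) (by omega) (by omega)
  apply PySem.List.eq_of_perm_of_pairwise_le_of_injective (fun v => v)
    (fun a b h => h)
  · refine List.Perm.trans List.perm_middle ?_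
    rw [List.take_append_drop]
    refine List.Perm.trans ((hperm.cons x).trans
      (by simpa using (List.perm_append_comm (l₁ := [x]) (l₂ := pre)))) ?_
    exact (PySem.List.sorted_perm (pre ++ [x]) (fun v => v) false).symm
  · rw [List.pairwise_append]
    refine ⟨hle.sublist (List.take_sublist k sl), ?_, ?_⟩
    · rw [List.pairwise_cons]
      exact ⟨fun b hb => le_of_lt (hmem_drop b hb), hle.sublist (List.drop_sublist k sl)⟩
    · intro a ha b hb
      rcases List.mem_cons.mp hb with rfl | hb'
      · exact hmem_take a ha
      · exact le_of_lt (lt_of_le_of_lt (hmem_take a ha) (hmem_drop b hb'))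
  · exact PySem.List.sorted_pairwise (pre ++ [x]) (fun v => v)

lemma pvStepA (pre : List Int) (d : PySem.Dict Int Int) (m x : Int) :
    stepA_maxDepthBST (PySem.List.sorted pre (fun v => v) false, d, m) x =
      (PySem.List.sorted (pre ++ [x]) (fun v => v) false,
       (pvAbsStep (pre, d, m) x).2.1, (pvAbsStep (pre, d, m) x).2.2) := by
  have hle : (PySem.List.sorted pre (fun v => v) false).Pairwise (· ≤ ·) :=
    PySem.List.sorted_pairwise pre (fun v => v)
  have hperm : (PySem.List.sorted pre (fun v => v) false).Perm pre :=
    PySem.List.sorted_perm pre (fun v => v) false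
  obtain ⟨hlen, hbelow, habove⟩ :=
    PySem.List.bisectLeft_spec (PySem.List.sorted pre (fun v => v) false) x hle
  have hpred := pvPred_of_spec pre (PySem.List.sorted pre (fun v => v) false) x
    (PySem.List.bisectLeft (PySem.List.sorted pre (fun v => v) false) x)
    hperm hle hbelow habove hlen
  have hsucc := pvSucc_of_spec pre (PySem.List.sorted pre (fun v => v) false) x
    (PySem.List.bisectLeft (PySem.List.sorted pre (fun v => v) false) x)
    hperm hle hbelow habove hlen
  have hins := pvInsort pre x
  simp only [stepA_maxDepthBST, pvAbsStep]
  rw [hpred, hsucc, hins]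

lemma pvFoldA (suf : List Int) : ∀ (pre : List Int) (d : PySem.Dict Int Int) (m : Int),
    suf.foldl stepA_maxDepthBST (PySem.List.sorted pre (fun v => v) false, d, m) =
      (PySem.List.sorted (suf.foldl pvAbsStep (pre, d, m)).1 (fun v => v) false,
       (suf.foldl pvAbsStep (pre, d, m)).2.1,
       (suf.foldl pvAbsStep (pre, d, m)).2.2) := by
  induction suf with
  | nil => intro pre d m; simp
  | cons x suf' ih =>
    intro pre d m
    rw [List.foldl_cons, pvStepA pre d m x]
    have habs : pvAbsStep (pre, d, m) x =
        (pre ++ [x], (pvAbsStep (pre, d, m) x).2.1, (pvAbsStep (pre, d, m) x).2.2) := rfl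
    rw [List.foldl_cons, habs, ih (pre ++ [x])]

lemma pvA_eq_abs (order : List Int) (hne : order ≠ []) :
    maxDepthBST order = (order.foldl pvAbsStep ([], PySem.Dict.empty, 0)).2.2 := by
  unfold maxDepthBST
  rw [if_neg hne]
  have hs : PySem.List.sorted ([] : List Int) (fun v => v) false = [] := rfl
  have := pvFoldA order [] PySem.Dict.empty 0
  rw [hs] at this
  rw [this]

-- ===== B-side abstractions =====
-- the sorted distinct values, their positions (ranks), and the set of ranks present
-- in a prefix of the insertion order
def pvSv (order : List Int) : List Int :=
  PySem.List.sorted (PySem.Set.ofList order) (fun v => v) false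
def pvSvD (order : List Int) (r : Nat) : Int := (pvSv order).getD r 0
def pvRho (order : List Int) (k : Nat) : Nat := (pvSv order).idxOf (order.getD k 0)
def pvRem (order : List Int) (t : Nat) : List Nat := (List.range t).map (pvRho order)
def pvPB (order : List Int) (t r : Nat) : Int :=
  match ((pvRem order t).filter (fun a => a < r)).max? with
  | some m => (m : Int)
  | none => -1
def pvSA (order : List Int) (t r : Nat) : Int :=
  match ((pvRem order t).filter (fun a => r < a)).min? with
  | some m => (m : Int)
  | none => ((pvSv order).length : Int)

lemma pvSv_lt (order : List Int) : (pvSv order).Pairwise (· < ·) :=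
  PySem.List.sorted_ofList_pairwise_lt order
lemma pvSv_nodup (order : List Int) : (pvSv order).Nodup :=
  (pvSv_lt order).imp ne_of_lt
lemma pvSv_mem (order : List Int) (v : Int) : v ∈ pvSv order ↔ v ∈ order := by
  rw [pvSv, PySem.List.mem_sorted, PySem.Set.mem_ofList]

lemma pvRho_lt (order : List Int) (k : Nat) (hk : k < order.length) :
    pvRho order k < (pvSv order).length := by
  have hmem : order.getD k 0 ∈ pvSv order := by
    rw [pvSv_mem, List.getD_eq_getElem order 0 hk]
    exact List.getElem_mem hk
  exact List.idxOf_lt_length_of_mem hmem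

lemma pvSvD_rho (order : List Int) (k : Nat) (hk : k < order.length) :
    pvSvD order (pvRho order k) = order.getD k 0 := by
  have hmem : order.getD k 0 ∈ pvSv order := by
    rw [pvSv_mem, List.getD_eq_getElem order 0 hk]
    exact List.getElem_mem hk
  have hlt := List.idxOf_lt_length_of_mem hmem
  simp only [pvSvD, pvRho]
  rw [List.getD_eq_getElem (pvSv order) 0 hlt]
  exact List.getElem_idxOf hlt

lemma pvMono (order : List Int) (r r' : Nat)
    (hr : r < (pvSv order).length) (hr' : r' < (pvSv order).length) :
    pvSvD order r < pvSvD order r' ↔ r < r' := by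
  have hlt := pvSv_lt order
  constructor
  · intro h
    by_contra hcon
    rcases Nat.lt_or_ge r' r with hc | hc
    · have := (List.pairwise_iff_getElem.mp hlt) r' r hr' hr hc
      rw [pvSvD, pvSvD, List.getD_eq_getElem _ 0 hr, List.getD_eq_getElem _ 0 hr'] at h
      omega
    · have : r = r' := by omega
      subst this
      exact absurd h (lt_irrefl _)
  · intro h
    have := (List.pairwise_iff_getElem.mp hlt) r r' hr hr' h
    rw [pvSvD, pvSvD, List.getD_eq_getElem _ 0 hr, List.getD_eq_getElem _ 0 hr']
    omega

lemma pvMem_rem (order : List Int) (t : Nat) (ht : t ≤ order.length) (r : Nat)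
    (h : r ∈ pvRem order t) : r < (pvSv order).length ∧ ∃ k, k < t ∧ pvRho order k = r := by
  rw [pvRem, List.mem_map] at h
  obtain ⟨k, hk, hrk⟩ := h
  rw [List.mem_range] at hk
  exact ⟨hrk ▸ pvRho_lt order k (by omega), k, hk, hrk⟩

lemma pvRem_mem_iff (order : List Int) (t : Nat) (ht : t ≤ order.length) (r : Nat)
    (hr : r < (pvSv order).length) :
    r ∈ pvRem order t ↔ pvSvD order r ∈ order.take t := by
  constructor
  · intro h
    obtain ⟨_, k, hk, hkr⟩ := pvMem_rem order t ht r h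
    rw [← hkr, pvSvD_rho order k (by omega), List.getD_eq_getElem order 0 (by omega)]
    have hk' : k < (order.take t).length := by
      rw [List.length_take]
      omega
    have : (order.take t)[k] = order[k] := List.getElem_take
    rw [← this]
    exact List.getElem_mem hk'
  · intro h
    obtain ⟨k, hk, hkr⟩ := pvMem_iff_getElem.mp h
    rw [List.length_take] at hk
    have hkn : k < order.length := by omega
    rw [List.getElem_take] at hkr
    rw [pvRem, List.mem_map]
    refine ⟨k, List.mem_range.mpr (by omega), ?_⟩
    rw [pvRho, List.getD_eq_getElem order 0 hkn, hkr]
    have : pvSvD order r = (pvSv order)[r] := by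
      rw [pvSvD, List.getD_eq_getElem _ 0 hr]
    rw [this]
    exact List.idxOf_getElem (pvSv_nodup order) r hr

lemma pvRem_mem_n (order : List Int) (r : Nat) (hr : r < (pvSv order).length) :
    r ∈ pvRem order order.length := by
  rw [pvRem_mem_iff order order.length (le_refl _) r hr, List.take_length]
  rw [← pvSv_mem]
  rw [pvSvD, List.getD_eq_getElem _ 0 hr]
  exact List.getElem_mem hr

lemma pvRem_succ (order : List Int) (t : Nat) :
    pvRem order (t + 1) = pvRem order t ++ [pvRho order t] := by
  rw [pvRem, List.range_succ, List.map_append, List.map_singleton, pvRem]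

lemma pvMax?_congr {l1 l2 : List Nat} (h : ∀ a, a ∈ l1 ↔ a ∈ l2) : l1.max? = l2.max? := by
  cases h1 : l1.max? with
  | none =>
    rw [List.max?_eq_none_iff] at h1
    symm
    rw [List.max?_eq_none_iff, List.eq_nil_iff_forall_not_mem]
    intro a ha
    exact absurd ((h a).mpr ha) (by simp [h1])
  | some m =>
    obtain ⟨hm, hub⟩ := List.max?_eq_some_iff.mp h1
    symm
    rw [List.max?_eq_some_iff]
    exact ⟨(h m).mp hm, fun b hb => hub b ((h b).mpr hb)⟩

lemma pvMin?_congr {l1 l2 : List Nat} (h : ∀ a, a ∈ l1 ↔ a ∈ l2) : l1.min? = l2.min? := by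
  cases h1 : l1.min? with
  | none =>
    rw [List.min?_eq_none_iff] at h1
    symm
    rw [List.min?_eq_none_iff, List.eq_nil_iff_forall_not_mem]
    intro a ha
    exact absurd ((h a).mpr ha) (by simp [h1])
  | some m =>
    obtain ⟨hm, hlb⟩ := List.min?_eq_some_iff.mp h1
    symm
    rw [List.min?_eq_some_iff]
    exact ⟨(h m).mp hm, fun b hb => hlb b ((h b).mpr hb)⟩

lemma pvMax?_append_le (l : List Nat) (a : Nat) (hb : ∃ b ∈ l, a ≤ b) :
    (l ++ [a]).max? = l.max? := by
  obtain ⟨b0, hb0, hab⟩ := hb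
  cases h1 : l.max? with
  | none =>
    rw [List.max?_eq_none_iff] at h1
    subst h1
    exact absurd hb0 (List.not_mem_nil)
  | some m =>
    obtain ⟨hm, hub⟩ := List.max?_eq_some_iff.mp h1
    rw [List.max?_eq_some_iff]
    constructor
    · exact List.mem_append_left _ hm
    · intro c hc
      rcases List.mem_append.mp hc with hc | hc
      · exact hub c hc
      · have : c = a := List.mem_singleton.mp hc
        subst this
        exact le_trans hab (hub b0 hb0)

lemma pvMin?_append_ge (l : List Nat) (a : Nat) (hb : ∃ b ∈ l, b ≤ a) :
    (l ++ [a]).min? = l.min? := by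
  obtain ⟨b0, hb0, hab⟩ := hb
  cases h1 : l.min? with
  | none =>
    rw [List.min?_eq_none_iff] at h1
    subst h1
    exact absurd hb0 (List.not_mem_nil)
  | some m =>
    obtain ⟨hm, hlb⟩ := List.min?_eq_some_iff.mp h1
    rw [List.min?_eq_some_iff]
    constructor
    · exact List.mem_append_left _ hm
    · intro c hc
      rcases List.mem_append.mp hc with hc | hc
      · exact hlb c hc
      · have : c = a := List.mem_singleton.mp hc
        subst this
        exact le_trans (hlb b0 hb0) hab

lemma pvMax?_map (order : List Int) (L : List Nat)
    (hL : ∀ a ∈ L, a < (pvSv order).length) :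
    (L.map (pvSvD order)).max? = L.max?.map (pvSvD order) := by
  cases h1 : L.max? with
  | none =>
    rw [List.max?_eq_none_iff] at h1
    subst h1
    rfl
  | some m =>
    obtain ⟨hm, hub⟩ := List.max?_eq_some_iff.mp h1
    rw [Option.map_some, List.max?_eq_some_iff]
    constructor
    · exact List.mem_map_of_mem hm
    · intro y hy
      obtain ⟨b, hb, hby⟩ := List.mem_map.mp hy
      subst hby
      rcases Nat.lt_or_ge b m with h | h
      · exact le_of_lt ((pvMono order b m (hL b hb) (hL m hm)).mpr h)
      · have : b = m := by have := hub b hb; omega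
        subst this
        exact le_refl _

lemma pvMin?_map (order : List Int) (L : List Nat)
    (hL : ∀ a ∈ L, a < (pvSv order).length) :
    (L.map (pvSvD order)).min? = L.min?.map (pvSvD order) := by
  cases h1 : L.min? with
  | none =>
    rw [List.min?_eq_none_iff] at h1
    subst h1
    rfl
  | some m =>
    obtain ⟨hm, hlb⟩ := List.min?_eq_some_iff.mp h1
    rw [Option.map_some, List.min?_eq_some_iff]
    constructor
    · exact List.mem_map_of_mem hm
    · intro y hy
      obtain ⟨b, hb, hby⟩ := List.mem_map.mp hy
      subst hby
      rcases Nat.lt_or_ge m b with h | h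
      · exact le_of_lt ((pvMono order m b (hL m hm) (hL b hb)).mpr h)
      · have : b = m := by have := hlb b hb; omega
        subst this
        exact le_refl _

lemma pvTake_map (order : List Int) (t : Nat) (ht : t ≤ order.length) :
    (pvRem order t).map (pvSvD order) = order.take t := by
  apply List.ext_getElem
  · simp [pvRem]
    omega
  · intro i h1 h2
    simp only [pvRem, List.getElem_map, List.getElem_range, List.getElem_take]
    rw [pvSvD_rho order i (by simp [pvRem] at h1; omega)]
    rw [List.getD_eq_getElem order 0]

lemma pvPredV_rank (order : List Int) (t r0 : Nat)
    (ht : t ≤ order.length) (hr0 : r0 < (pvSv order).length) :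
    pvPredV (order.take t) (pvSvD order r0) =
      (((pvRem order t).filter (fun a => a < r0)).max?).map (pvSvD order) := by
  rw [pvPredV, ← pvTake_map order t ht, List.filter_map]
  have hcongr : (pvRem order t).filter ((fun y => decide (y < pvSvD order r0)) ∘ pvSvD order) =
      (pvRem order t).filter (fun a => a < r0) := by
    apply List.filter_congr
    intro a ha
    have halt := (pvMem_rem order t ht a ha).1
    simp only [Function.comp]
    rw [decide_eq_decide]
    exact pvMono order a r0 halt hr0
  rw [hcongr]
  apply pvMax?_map order
  intro a ha
  exact (pvMem_rem order t ht a (List.mem_of_mem_filter ha)).1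

lemma pvSuccV_rank (order : List Int) (t r0 : Nat)
    (ht : t ≤ order.length) (hr0 : r0 < (pvSv order).length)
    (hx : pvSvD order r0 ∉ order.take t) :
    pvSuccV (order.take t) (pvSvD order r0) =
      (((pvRem order t).filter (fun a => r0 < a)).min?).map (pvSvD order) := by
  rw [pvSuccV, if_neg hx, ← pvTake_map order t ht, List.filter_map]
  have hcongr : (pvRem order t).filter ((fun y => decide (pvSvD order r0 < y)) ∘ pvSvD order) =
      (pvRem order t).filter (fun a => r0 < a) := by
    apply List.filter_congr
    intro a ha
    have halt := (pvMem_rem order t ht a ha).1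
    simp only [Function.comp]
    rw [decide_eq_decide]
    exact pvMono order r0 a hr0 halt
  rw [hcongr]
  apply pvMin?_map order
  intro a ha
  exact (pvMem_rem order t ht a (List.mem_of_mem_filter ha)).1

-- the port's rank and first-occurrence dicts, initial pointer arrays, and the reverse-loop
-- state after the elements at positions ≥ t have been processed
def pvRank (order : List Int) : PySem.Dict Int Int :=
  (PySem.List.enumerate (pvSv order) 0).foldl
    (fun (d : PySem.Dict Int Int) p => d.insert p.2 p.1) PySem.Dict.empty
def pvFirst (order : List Int) : PySem.Dict Int Int :=
  (PySem.List.pyRange ((PySem.List.len order) - 1) (-1) (-1)).foldl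
    (fun (d : PySem.Dict Int Int) j => d.insert (PySem.List.pyGetD order j 0) j)
    PySem.Dict.empty
def pvPrev0 (order : List Int) : List Int :=
  (PySem.List.pyRange 0 (PySem.List.len (pvSv order)) 1).map (fun i => i - 1)
def pvNxt0 (order : List Int) : List Int :=
  (PySem.List.pyRange 0 (PySem.List.len (pvSv order)) 1).map (fun i => i + 1)
def pvG (order : List Int) (t : Nat) :
    List Int × List Int × PySem.Dict Int (Option Int × Option Int) :=
  (((PySem.List.pyRange (t : Int) (PySem.List.len order) 1).map
      (fun j => (j, PySem.List.pyGetD order j 0))).reverse).foldl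
    (fun st jx => stepRev_maxDepthBST (pvSv order) (pvRank order) (pvFirst order)
      (PySem.List.len (pvSv order)) st jx.1 jx.2)
    (pvPrev0 order, pvNxt0 order, PySem.Dict.empty)

def pvInv (order : List Int) (t : Nat)
    (st : List Int × List Int × PySem.Dict Int (Option Int × Option Int)) : Prop :=
  st.1.length = (pvSv order).length ∧ st.2.1.length = (pvSv order).length ∧
  (∀ r ∈ pvRem order t, st.1[r]? = some (pvPB order t r) ∧ st.2.1[r]? = some (pvSA order t r)) ∧
  ∀ j, t ≤ j → j < order.length → st.2.2.get? ((j : Nat) : Int) =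
    some (pvPredV (order.take j) (order.getD j 0), pvSuccV (order.take j) (order.getD j 0))

lemma pvRank_get? (order : List Int) (k : Nat) (hk : k < order.length) :
    (pvRank order).get? (order.getD k 0) = some ((pvRho order k : Nat) : Int) := by
  have hfresh : ∀ a ∈ PySem.List.enumerate (pvSv order) 0,
      (PySem.Dict.empty : PySem.Dict Int Int).contains a.2 = false := by
    intro a _
    exact PySem.Dict.contains_empty a.2
  have hsnd : (List.map (fun (a : Int × Int) => a.2)
      (PySem.List.enumerate (pvSv order) 0)).Nodup := by
    rw [PySem.List.map_snd_enumerate]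
    exact pvSv_nodup order
  have hitems := PySem.Dict.items_foldl_insert_fresh
    (PySem.List.enumerate (pvSv order) 0)
    (fun a => a.2) (fun a => a.1) PySem.Dict.empty hfresh hsnd
  have hemp : (PySem.Dict.empty : PySem.Dict Int Int).items = [] := rfl
  have hkeysnd : (pvRank order).keys.Nodup := by
    have hk2 : (pvRank order).keys = List.map Prod.fst (pvRank order).items := rfl
    rw [hk2, pvRank, hitems, hemp, List.nil_append, List.map_map]
    exact hsnd
  apply PySem.Dict.get?_of_mem_items _ _ hkeysnd
  rw [pvRank, hitems, hemp, List.nil_append]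
  rw [List.mem_map]
  have hr' := pvRho_lt order k hk
  refine ⟨(((pvRho order k : Nat) : Int), (pvSv order)[pvRho order k]), ?_, ?_⟩
  · rw [PySem.List.mem_enumerate_iff]
    exact ⟨pvRho order k, hr', Prod.ext_iff.mpr ⟨by simp, rfl⟩⟩
  · have : (pvSv order)[pvRho order k] = order.getD k 0 := by
      rw [← pvSvD_rho order k hk, pvSvD, List.getD_eq_getElem _ 0 hr']
    rw [this]

lemma pvRank_getD (order : List Int) (k : Nat) (hk : k < order.length) :
    (pvRank order).getD (order.getD k 0) 0 = ((pvRho order k : Nat) : Int) := by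
  rw [PySem.Dict.getD_eq_get?_getD, pvRank_get? order k hk]
  rfl

-- the first-occurrence dict: value of the reverse-insert loop from position t on
def pvFirstG (order : List Int) (t : Nat) : PySem.Dict Int Int :=
  ((PySem.List.pyRange (t : Int) (PySem.List.len order) 1).reverse).foldl
    (fun (d : PySem.Dict Int Int) j => d.insert (PySem.List.pyGetD order j 0) j)
    PySem.Dict.empty

lemma pvFirst_eq_G0 (order : List Int) : pvFirst order = pvFirstG order 0 := by
  rw [pvFirst, pvFirstG, PySem.List.pyRange_neg_one_eq_reverse]
  have h1 : (-1 + 1 : Int) = ((0 : Nat) : Int) := by norm_num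
  have h2 : PySem.List.len order - 1 + 1 = PySem.List.len order := by omega
  rw [h1, h2]

lemma pvFirstG_base (order : List Int) : pvFirstG order order.length = PySem.Dict.empty := by
  rw [pvFirstG, PySem.List.pyRange_one_eq_nil (by rw [PySem.List.len_eq])]
  rfl

lemma pvFirstG_succ (order : List Int) (t : Nat) (ht : t < order.length) :
    pvFirstG order t = (pvFirstG order (t+1)).insert (order.getD t 0) ((t : Nat) : Int) := by
  rw [pvFirstG, pvFirstG]
  have hcons : PySem.List.pyRange ((t : Nat) : Int) (PySem.List.len order) 1 =
      ((t : Nat) : Int) :: PySem.List.pyRange (((t+1) : Nat) : Int) (PySem.List.len order) 1 := by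
    rw [PySem.List.pyRange_one_cons (by rw [PySem.List.len_eq]; exact_mod_cast ht)]
    congr 1
  rw [hcons, List.reverse_cons, List.foldl_append]
  simp only [List.foldl_cons, List.foldl_nil]
  congr 1
  rw [PySem.List.pyGetD_natCast]

lemma pvFirstG_char (order : List Int) :
    ∀ m t, t + m = order.length → ∀ v : Int,
    (pvFirstG order t).get? v =
      if v ∈ order.drop t then some (((t + (order.drop t).idxOf v : Nat) : Int)) else none := by
  intro m
  induction m with
  | zero =>
    intro t h v
    have : t = order.length := by omega
    subst this
    rw [pvFirstG_base, List.drop_length]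
    simp [PySem.Dict.get?_empty]
  | succ m ih =>
    intro t h v
    have ht : t < order.length := by omega
    rw [pvFirstG_succ order t ht]
    have hdrop : order.drop t = order.getD t 0 :: order.drop (t+1) := by
      rw [List.getD_eq_getElem order 0 ht]
      exact List.drop_eq_getElem_cons ht
    by_cases hv : v = order.getD t 0
    · subst hv
      rw [PySem.Dict.get?_insert_self, hdrop]
      rw [if_pos List.mem_cons_self]
      congr 2
      rw [List.idxOf_cons_self]
      omega
    · rw [PySem.Dict.get?_insert_of_ne (hne := hv), ih (t+1) (by omega) v, hdrop]
      by_cases hmem : v ∈ order.drop (t+1)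
      · rw [if_pos hmem, if_pos (List.mem_cons_of_mem _ hmem)]
        congr 2
        rw [List.idxOf_cons_ne _ (fun h => hv h.symm)]
        omega
      · rw [if_neg hmem, if_neg ?_]
        intro hc
        rcases List.mem_cons.mp hc with h | h
        · exact hv h
        · exact hmem h

lemma pvFirst_lt_iff (order : List Int) (k : Nat) (hk : k < order.length) :
    ((pvFirst order).getD (order.getD k 0) 0 < ((k : Nat) : Int)) ↔
      order.getD k 0 ∈ order.take k := by
  have hmem : order.getD k 0 ∈ order := by
    rw [List.getD_eq_getElem order 0 hk]
    exact List.getElem_mem hk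
  have hchar := pvFirstG_char order order.length 0 (by omega) (order.getD k 0)
  rw [List.drop_zero, if_pos hmem] at hchar
  rw [pvFirst_eq_G0, PySem.Dict.getD_eq_get?_getD, hchar]
  simp only [Option.getD_some, Nat.zero_add]
  have hidx : order.idxOf (order.getD k 0) < order.length :=
    List.idxOf_lt_length_of_mem hmem
  constructor
  · intro h
    have h' : order.idxOf (order.getD k 0) < k := by exact_mod_cast h
    have : (order.take k)[order.idxOf (order.getD k 0)]'(by rw [List.length_take]; omega) =
        order[order.idxOf (order.getD k 0)] := List.getElem_take
    rw [← List.getElem_idxOf hidx, ← this]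
    exact List.getElem_mem _
  · intro h
    have : order.idxOf (order.getD k 0) < k := by
      have heq : order = order.take k ++ order.drop k := (List.take_append_drop k order).symm
      calc order.idxOf (order.getD k 0)
          = (order.take k ++ order.drop k).idxOf (order.getD k 0) := by rw [← heq]
        _ = (order.take k).idxOf (order.getD k 0) := List.idxOf_append_of_mem h
        _ < (order.take k).length := List.idxOf_lt_length_of_mem h
        _ ≤ k := by rw [List.length_take]; omega
    exact_mod_cast this

lemma pvMem_rem_succ_elim (order : List Int) (t : Nat) (a : Nat)
    (h : a ∈ pvRem order (t+1)) : a ∈ pvRem order t ∨ a = pvRho order t := by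
  rw [pvRem_succ, List.mem_append] at h
  rcases h with h | h
  · exact Or.inl h
  · exact Or.inr (List.mem_singleton.mp h)

-- the below/above filters of the removed rank r0 are the same over Rem t and Rem (t+1)
lemma pvFilter_below_succ (order : List Int) (t : Nat) :
    (pvRem order (t+1)).filter (fun a => a < pvRho order t) =
      (pvRem order t).filter (fun a => a < pvRho order t) := by
  rw [pvRem_succ, List.filter_append]
  simp

lemma pvFilter_above_succ (order : List Int) (t : Nat) :
    (pvRem order (t+1)).filter (fun a => pvRho order t < a) =
      (pvRem order t).filter (fun a => pvRho order t < a) := by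
  rw [pvRem_succ, List.filter_append]
  simp

-- pB is unchanged by the removal for any surviving rank that is not r0's successor
lemma pvPB_shift_eq (order : List Int) (t : Nat)
    (r : Nat) (hr : r ∈ pvRem order t)
    (hcase : ((pvRem order (t+1)).filter (fun a => pvRho order t < a)).min? ≠ some r) :
    pvPB order t r = pvPB order (t+1) r := by
  rw [pvPB, pvPB, pvRem_succ, List.filter_append]
  by_cases hlt : pvRho order t < r
  · have hfil : [pvRho order t].filter (fun a => a < r) = [pvRho order t] := by
      simp [hlt]
    rw [hfil]
    have hrmem : r ∈ (pvRem order (t+1)).filter (fun a => pvRho order t < a) := by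
      rw [List.mem_filter]
      exact ⟨by rw [pvRem_succ]; exact List.mem_append_left _ hr, by simpa using hlt⟩
    cases hmin : ((pvRem order (t+1)).filter (fun a => pvRho order t < a)).min? with
    | none =>
      rw [List.min?_eq_none_iff] at hmin
      rw [hmin] at hrmem
      exact absurd hrmem (List.not_mem_nil)
    | some ms =>
      obtain ⟨hmsmem, hmslb⟩ := List.min?_eq_some_iff.mp hmin
      have hmsr : ms ≤ r := hmslb r hrmem
      have hmsne : ms ≠ r := fun h => hcase (h ▸ hmin)
      rw [List.mem_filter] at hmsmem
      have hms0 : pvRho order t < ms := by simpa using hmsmem.2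
      have hmsrem : ms ∈ pvRem order t := by
        rcases pvMem_rem_succ_elim order t ms hmsmem.1 with h | h
        · exact h
        · omega
      rw [pvMax?_append_le]
      refine ⟨ms, ?_, by omega⟩
      rw [List.mem_filter]
      exact ⟨hmsrem, by simp; omega⟩
  · have hfil : [pvRho order t].filter (fun a => a < r) = [] := by
      simp
      omega
    rw [hfil, List.append_nil]

-- sA is unchanged by the removal for any surviving rank that is not r0's predecessor
lemma pvSA_shift_eq (order : List Int) (t : Nat)
    (r : Nat) (hr : r ∈ pvRem order t)
    (hcase : ((pvRem order (t+1)).filter (fun a => a < pvRho order t)).max? ≠ some r) :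
    pvSA order t r = pvSA order (t+1) r := by
  rw [pvSA, pvSA, pvRem_succ, List.filter_append]
  by_cases hlt : r < pvRho order t
  · have hfil : [pvRho order t].filter (fun a => r < a) = [pvRho order t] := by
      simp [hlt]
    rw [hfil]
    have hrmem : r ∈ (pvRem order (t+1)).filter (fun a => a < pvRho order t) := by
      rw [List.mem_filter]
      exact ⟨by rw [pvRem_succ]; exact List.mem_append_left _ hr, by simpa using hlt⟩
    cases hmax : ((pvRem order (t+1)).filter (fun a => a < pvRho order t)).max? with
    | none =>
      rw [List.max?_eq_none_iff] at hmax
      rw [hmax] at hrmem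
      exact absurd hrmem (List.not_mem_nil)
    | some mb =>
      obtain ⟨hmbmem, hmbub⟩ := List.max?_eq_some_iff.mp hmax
      have hmbr : r ≤ mb := hmbub r hrmem
      have hmbne : mb ≠ r := fun h => hcase (h ▸ hmax)
      rw [List.mem_filter] at hmbmem
      have hmb0 : mb < pvRho order t := by simpa using hmbmem.2
      have hmbrem : mb ∈ pvRem order t := by
        rcases pvMem_rem_succ_elim order t mb hmbmem.1 with h | h
        · exact h
        · omega
      rw [pvMin?_append_ge]
      refine ⟨mb, ?_, by omega⟩
      rw [List.mem_filter]
      exact ⟨hmbrem, by simp; omega⟩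
  · have hfil : [pvRho order t].filter (fun a => r < a) = [] := by
      simp
      omega
    rw [hfil, List.append_nil]

-- at r0's successor ms, the new pB is r0's pB
lemma pvPB_new_at_ms (order : List Int) (t : Nat)
    (hr0 : pvRho order t ∉ pvRem order t) (ms : Nat)
    (hms : ((pvRem order (t+1)).filter (fun a => pvRho order t < a)).min? = some ms) :
    pvPB order t ms = pvPB order (t+1) (pvRho order t) := by
  obtain ⟨hmsmem, hmslb⟩ := List.min?_eq_some_iff.mp hms
  rw [List.mem_filter] at hmsmem
  have hms0 : pvRho order t < ms := by simpa using hmsmem.2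
  rw [pvPB, pvPB]
  have hcongr : ∀ a, a ∈ (pvRem order t).filter (fun x => x < ms) ↔
      a ∈ (pvRem order (t+1)).filter (fun x => x < pvRho order t) := by
    intro a
    rw [List.mem_filter, List.mem_filter]
    constructor
    · rintro ⟨hmem, hlt⟩
      have hlt' : a < ms := by simpa using hlt
      have hane : a ≠ pvRho order t := fun h => hr0 (h ▸ hmem)
      refine ⟨by rw [pvRem_succ]; exact List.mem_append_left _ hmem, ?_⟩
      simp only [decide_eq_true_eq]
      by_contra hcon
      have har0 : pvRho order t < a := by omega
      have := hmslb a (by rw [List.mem_filter]; exact ⟨by rw [pvRem_succ]; exact List.mem_append_left _ hmem, by simpa using har0⟩)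
      omega
    · rintro ⟨hmem, hlt⟩
      have hlt' : a < pvRho order t := by simpa using hlt
      have hane : a ≠ pvRho order t := by omega
      have hmem' : a ∈ pvRem order t := by
        rcases pvMem_rem_succ_elim order t a hmem with h | h
        · exact h
        · omega
      exact ⟨hmem', by simp; omega⟩
  rw [pvMax?_congr hcongr]

-- at r0's predecessor mb, the new sA is r0's sA
lemma pvSA_new_at_mb (order : List Int) (t : Nat)
    (hr0 : pvRho order t ∉ pvRem order t) (mb : Nat)
    (hmb : ((pvRem order (t+1)).filter (fun a => a < pvRho order t)).max? = some mb) :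
    pvSA order t mb = pvSA order (t+1) (pvRho order t) := by
  obtain ⟨hmbmem, hmbub⟩ := List.max?_eq_some_iff.mp hmb
  rw [List.mem_filter] at hmbmem
  have hmb0 : mb < pvRho order t := by simpa using hmbmem.2
  rw [pvSA, pvSA]
  have hcongr : ∀ a, a ∈ (pvRem order t).filter (fun x => mb < x) ↔
      a ∈ (pvRem order (t+1)).filter (fun x => pvRho order t < x) := by
    intro a
    rw [List.mem_filter, List.mem_filter]
    constructor
    · rintro ⟨hmem, hlt⟩
      have hlt' : mb < a := by simpa using hlt
      have hane : a ≠ pvRho order t := fun h => hr0 (h ▸ hmem)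
      refine ⟨by rw [pvRem_succ]; exact List.mem_append_left _ hmem, ?_⟩
      simp only [decide_eq_true_eq]
      by_contra hcon
      have har0 : a < pvRho order t := by omega
      have := hmbub a (by rw [List.mem_filter]; exact ⟨by rw [pvRem_succ]; exact List.mem_append_left _ hmem, by simpa using har0⟩)
      omega
    · rintro ⟨hmem, hlt⟩
      have hlt' : pvRho order t < a := by simpa using hlt
      have hane : a ≠ pvRho order t := by omega
      have hmem' : a ∈ pvRem order t := by
        rcases pvMem_rem_succ_elim order t a hmem with h | h
        · exact h
        · omega
      exact ⟨hmem', by simp; omega⟩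
  rw [pvMin?_congr hcongr]

-- when the processed element is a repeated value its rank stays in the list: nothing changes
lemma pvPB_dup_eq (order : List Int) (t : Nat) (hr0 : pvRho order t ∈ pvRem order t) (r : Nat) :
    pvPB order t r = pvPB order (t+1) r := by
  rw [pvPB, pvPB]
  rw [pvMax?_congr (l2 := (pvRem order (t+1)).filter (fun a => a < r)) ?_]
  intro a
  rw [List.mem_filter, List.mem_filter, pvRem_succ, List.mem_append, List.mem_singleton]
  constructor
  · rintro ⟨h1, h2⟩
    exact ⟨Or.inl h1, h2⟩
  · rintro ⟨h1, h2⟩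
    rcases h1 with h | h
    · exact ⟨h, h2⟩
    · exact ⟨h ▸ hr0, h2⟩

lemma pvSA_dup_eq (order : List Int) (t : Nat) (hr0 : pvRho order t ∈ pvRem order t) (r : Nat) :
    pvSA order t r = pvSA order (t+1) r := by
  rw [pvSA, pvSA]
  rw [pvMin?_congr (l2 := (pvRem order (t+1)).filter (fun a => r < a)) ?_]
  intro a
  rw [List.mem_filter, List.mem_filter, pvRem_succ, List.mem_append, List.mem_singleton]
  constructor
  · rintro ⟨h1, h2⟩
    exact ⟨Or.inl h1, h2⟩
  · rintro ⟨h1, h2⟩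
    rcases h1 with h | h
    · exact ⟨h, h2⟩
    · exact ⟨h ▸ hr0, h2⟩

lemma pvPrev0_len (order : List Int) : (pvPrev0 order).length = (pvSv order).length := by
  rw [pvPrev0, List.length_map, PySem.List.len_eq, PySem.List.length_pyRange_one]
  omega
lemma pvNxt0_len (order : List Int) : (pvNxt0 order).length = (pvSv order).length := by
  rw [pvNxt0, List.length_map, PySem.List.len_eq, PySem.List.length_pyRange_one]
  omega

lemma pvInv_init (order : List Int) :
    pvInv order order.length (pvPrev0 order, pvNxt0 order, PySem.Dict.empty) := by
  refine ⟨pvPrev0_len order, pvNxt0_len order, ?_, ?_⟩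
  · intro r hr
    have hrn : r < (pvSv order).length := (pvMem_rem order order.length (le_refl _) r hr).1
    have hrlen : r < (PySem.List.pyRange 0 (PySem.List.len (pvSv order)) 1).length := by
      rw [PySem.List.len_eq, PySem.List.length_pyRange_one]; omega
    have hrg : (PySem.List.pyRange 0 (PySem.List.len (pvSv order)) 1)[r]? = some ((r : Nat) : Int) := by
      rw [List.getElem?_eq_getElem hrlen, PySem.List.getElem_pyRange_one]
      simp
    constructor
    · rw [pvPrev0, List.getElem?_map, hrg, Option.map_some]
      congr 1
      rw [pvPB]
      rcases Nat.eq_zero_or_pos r with h0 | h0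
      · subst h0
        have : (pvRem order order.length).filter (fun a => a < 0) = [] := by
          rw [List.filter_eq_nil_iff]
          intro a _ ha
          simp at ha
        rw [this]
        simp
      · have : ((pvRem order order.length).filter (fun a => a < r)).max? = some (r - 1) := by
          rw [List.max?_eq_some_iff]
          constructor
          · rw [List.mem_filter]
            exact ⟨pvRem_mem_n order (r-1) (by omega), by simp; omega⟩
          · intro b hb
            rw [List.mem_filter] at hb
            have : b < r := by simpa using hb.2
            omega
        rw [this]
        push_cast [h0]
        omega
    · rw [pvNxt0, List.getElem?_map, hrg, Option.map_some]
      congr 1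
      rw [pvSA]
      rcases Nat.lt_or_ge (r+1) (pvSv order).length with h0 | h0
      · have : ((pvRem order order.length).filter (fun a => r < a)).min? = some (r + 1) := by
          rw [List.min?_eq_some_iff]
          constructor
          · rw [List.mem_filter]
            exact ⟨pvRem_mem_n order (r+1) (by omega), by simp⟩
          · intro b hb
            rw [List.mem_filter] at hb
            have : r < b := by simpa using hb.2
            omega
        rw [this]
        push_cast
        omega
      · have : (pvRem order order.length).filter (fun a => r < a) = [] := by
          rw [List.filter_eq_nil_iff]
          intro a ha hra
          have := (pvMem_rem order order.length (le_refl _) a ha).1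
          simp at hra
          omega
        rw [this]
        simp
        omega
  · intro j hj hjn
    omega

lemma pvG_base (order : List Int) :
    pvG order order.length = (pvPrev0 order, pvNxt0 order, PySem.Dict.empty) := by
  rw [pvG, PySem.List.pyRange_one_eq_nil (by rw [PySem.List.len_eq])]
  rfl

lemma pvG_succ (order : List Int) (t : Nat) (ht : t < order.length) :
    pvG order t = stepRev_maxDepthBST (pvSv order) (pvRank order) (pvFirst order)
      (PySem.List.len (pvSv order)) (pvG order (t+1)) ((t : Nat) : Int) (order.getD t 0) := by
  rw [pvG, pvG]
  have hcons : PySem.List.pyRange ((t : Nat) : Int) (PySem.List.len order) 1 =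
      ((t : Nat) : Int) :: PySem.List.pyRange (((t+1) : Nat) : Int) (PySem.List.len order) 1 := by
    rw [PySem.List.pyRange_one_cons (by rw [PySem.List.len_eq]; exact_mod_cast ht)]
    congr 1
  rw [hcons, List.map_cons, List.reverse_cons, List.foldl_append]
  simp only [List.foldl_cons, List.foldl_nil]
  congr 1
  rw [PySem.List.pyGetD_natCast]

lemma pvStep_inv (order : List Int) (t : Nat) (ht : t < order.length)
    (st : List Int × List Int × PySem.Dict Int (Option Int × Option Int))
    (hinv : pvInv order (t+1) st) :
    pvInv order t
      (stepRev_maxDepthBST (pvSv order) (pvRank order) (pvFirst order)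
        (PySem.List.len (pvSv order)) st ((t : Nat) : Int) (order.getD t 0)) := by
  obtain ⟨hlp, hln, hptr, hnbr⟩ := hinv
  have hr0n : pvRho order t < (pvSv order).length := pvRho_lt order t ht
  have hr0mem : pvRho order t ∈ pvRem order (t+1) := by
    rw [pvRem_succ]
    exact List.mem_append_right _ (List.mem_singleton.mpr rfl)
  have hx : order.getD t 0 = pvSvD order (pvRho order t) := (pvSvD_rho order t ht).symm
  have hrank : (pvRank order).getD (order.getD t 0) 0 = ((pvRho order t : Nat) : Int) :=
    pvRank_getD order t ht
  obtain ⟨hpr0, hsr0⟩ := hptr (pvRho order t) hr0mem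
  have hp : PySem.List.pyGetD st.1 ((pvRho order t : Nat) : Int) (-1) =
      pvPB order (t+1) (pvRho order t) := by
    rw [PySem.List.pyGetD_natCast, List.getD_eq_getElem?_getD, hpr0]
    rfl
  have hs : PySem.List.pyGetD st.2.1 ((pvRho order t : Nat) : Int) (-1) =
      pvSA order (t+1) (pvRho order t) := by
    rw [PySem.List.pyGetD_natCast, List.getD_eq_getElem?_getD, hsr0]
    rfl
  by_cases hdup : order.getD t 0 ∈ order.take t
  · -- a repeated value: only the nbr record changes
    have hfc : (pvFirst order).getD (order.getD t 0) 0 < ((t : Nat) : Int) :=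
      (pvFirst_lt_iff order t ht).mpr hdup
    have hr0rem : pvRho order t ∈ pvRem order t := by
      rw [pvRem_mem_iff order t (by omega) _ hr0n, ← hx]
      exact hdup
    simp only [stepRev_maxDepthBST, hrank, hp, if_pos hfc]
    refine ⟨hlp, hln, ?_, ?_⟩
    · intro r hrmem
      have hrmem1 : r ∈ pvRem order (t+1) := by
        rw [pvRem_succ]
        exact List.mem_append_left _ hrmem
      obtain ⟨hprR, hsrR⟩ := hptr r hrmem1
      rw [hprR, hsrR, ← pvPB_dup_eq order t hr0rem r, ← pvSA_dup_eq order t hr0rem r]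
      exact ⟨rfl, rfl⟩
    · intro j hj hjn
      by_cases hjt : j = t
      · subst hjt
        rw [PySem.Dict.get?_insert_self]
        congr 1
        have hsv : pvSuccV (order.take j) (order.getD j 0) = some (order.getD j 0) := by
          rw [pvSuccV, if_pos hdup]
        have hpv : (if pvPB order (j+1) (pvRho order j) ≥ 0
              then PySem.List.pyGet? (pvSv order) (pvPB order (j+1) (pvRho order j)) else none) =
            pvPredV (order.take j) (order.getD j 0) := by
          rw [hx, pvPredV_rank order j (pvRho order j) (by omega) hr0n,
            ← pvPB_dup_eq order j hr0rem (pvRho order j)]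
          cases hPBmax : ((pvRem order j).filter (fun a => a < pvRho order j)).max? with
          | some mb =>
            have hmem := List.max?_mem hPBmax
            have hmbn : mb < (pvSv order).length :=
              (pvMem_rem order j (by omega) mb (List.mem_filter.mp hmem).1).1
            have hpval : pvPB order j (pvRho order j) = ((mb : Nat) : Int) := by
              rw [pvPB, hPBmax]
            rw [hpval, if_pos (by omega), PySem.List.pyGet?_natCast, Option.map_some]
            rw [List.getElem?_eq_getElem hmbn]
            congr 1
            rw [pvSvD, List.getD_eq_getElem _ 0 hmbn]
          | none =>
            have hpval : pvPB order j (pvRho order j) = -1 := by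
              rw [pvPB, hPBmax]
            rw [hpval, if_neg (by omega), Option.map_none]
        rw [hpv, hsv]
      · have hne : ((j : Nat) : Int) ≠ ((t : Nat) : Int) := by
          intro h
          exact hjt (by exact_mod_cast h)
        rw [PySem.Dict.get?_insert_of_ne (hne := hne)]
        exact hnbr j (by omega) hjn
  · -- first occurrence: the rank is unlinked and its neighbors recorded
    have hfc : ¬ ((pvFirst order).getD (order.getD t 0) 0 < ((t : Nat) : Int)) := by
      rw [pvFirst_lt_iff order t ht]
      exact hdup
    have hr0notmem : pvRho order t ∉ pvRem order t := by
      rw [pvRem_mem_iff order t (by omega) _ hr0n, ← hx]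
      exact hdup
    simp only [stepRev_maxDepthBST, hrank, hp, hs, if_neg hfc]
    refine ⟨?_, ?_, ?_, ?_⟩
    · by_cases hc : pvSA order (t+1) (pvRho order t) < PySem.List.len (pvSv order)
      · rw [if_pos hc, List.length_set]
        exact hlp
      · rw [if_neg hc]
        exact hlp
    · by_cases hc : pvPB order (t+1) (pvRho order t) ≥ 0
      · rw [if_pos hc, List.length_set]
        exact hln
      · rw [if_neg hc]
        exact hln
    · intro r hrmem
      have hrmem1 : r ∈ pvRem order (t+1) := by
        rw [pvRem_succ]
        exact List.mem_append_left _ hrmem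
      have hrn : r < (pvSv order).length := (pvMem_rem order t (by omega) r hrmem).1
      obtain ⟨hprR, hsrR⟩ := hptr r hrmem1
      constructor
      · cases hSAmin : ((pvRem order (t+1)).filter (fun a => pvRho order t < a)).min? with
        | some ms =>
          have hmem := List.min?_mem hSAmin
          have hmsn : ms < (pvSv order).length :=
            (pvMem_rem order (t+1) (by omega) ms (List.mem_filter.mp hmem).1).1
          have hsval : pvSA order (t+1) (pvRho order t) = ((ms : Nat) : Int) := by
            rw [pvSA, hSAmin]
          have hcond : pvSA order (t+1) (pvRho order t) < PySem.List.len (pvSv order) := by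
            rw [hsval, PySem.List.len_eq]
            exact_mod_cast hmsn
          rw [if_pos hcond, hsval]
          have htn : ((ms : Nat) : Int).toNat = ms := by omega
          rw [htn]
          by_cases hrms : r = ms
          · subst hrms
            have hrlen : r < st.1.length := by omega
            rw [List.getElem?_set_self hrlen]
            congr 1
            exact (pvPB_new_at_ms order t hr0notmem r hSAmin).symm
          · rw [List.getElem?_set_ne (fun h => hrms (h.symm)), hprR]
            congr 1
            exact (pvPB_shift_eq order t r hrmem (by rw [hSAmin]; simp; omega)).symm
        | none =>
          have hsval : pvSA order (t+1) (pvRho order t) = (((pvSv order).length : Nat) : Int) := by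
            rw [pvSA, hSAmin]
          have hcond : ¬ (pvSA order (t+1) (pvRho order t) < PySem.List.len (pvSv order)) := by
            rw [hsval, PySem.List.len_eq]
            omega
          rw [if_neg hcond, hprR]
          congr 1
          exact (pvPB_shift_eq order t r hrmem (by rw [hSAmin]; simp)).symm
      · cases hPBmax : ((pvRem order (t+1)).filter (fun a => a < pvRho order t)).max? with
        | some mb =>
          have hmem := List.max?_mem hPBmax
          have hmbn : mb < (pvSv order).length :=
            (pvMem_rem order (t+1) (by omega) mb (List.mem_filter.mp hmem).1).1
          have hpval : pvPB order (t+1) (pvRho order t) = ((mb : Nat) : Int) := by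
            rw [pvPB, hPBmax]
          have hcond : pvPB order (t+1) (pvRho order t) ≥ 0 := by
            rw [hpval]
            omega
          rw [if_pos hcond, hpval]
          have htn : ((mb : Nat) : Int).toNat = mb := by omega
          rw [htn]
          by_cases hrmb : r = mb
          · subst hrmb
            have hrlen : r < st.2.1.length := by omega
            rw [List.getElem?_set_self hrlen]
            congr 1
            exact (pvSA_new_at_mb order t hr0notmem r hPBmax).symm
          · rw [List.getElem?_set_ne (fun h => hrmb (h.symm)), hsrR]
            congr 1
            exact (pvSA_shift_eq order t r hrmem (by rw [hPBmax]; simp; omega)).symm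
        | none =>
          have hpval : pvPB order (t+1) (pvRho order t) = -1 := by
            rw [pvPB, hPBmax]
          have hcond : ¬ (pvPB order (t+1) (pvRho order t) ≥ 0) := by
            rw [hpval]
            omega
          rw [if_neg hcond, hsrR]
          congr 1
          exact (pvSA_shift_eq order t r hrmem (by rw [hPBmax]; simp)).symm
    · intro j hj hjn
      by_cases hjt : j = t
      · subst hjt
        have hpv : (if pvPB order (j+1) (pvRho order j) ≥ 0
              then PySem.List.pyGet? (pvSv order) (pvPB order (j+1) (pvRho order j)) else none) =
            pvPredV (order.take j) (order.getD j 0) := by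
          rw [hx, pvPredV_rank order j (pvRho order j) (by omega) hr0n,
            ← pvFilter_below_succ order j]
          cases hPBmax : ((pvRem order (j+1)).filter (fun a => a < pvRho order j)).max? with
          | some mb =>
            have hmem := List.max?_mem hPBmax
            have hmbn : mb < (pvSv order).length :=
              (pvMem_rem order (j+1) (by omega) mb (List.mem_filter.mp hmem).1).1
            have hpval : pvPB order (j+1) (pvRho order j) = ((mb : Nat) : Int) := by
              rw [pvPB, hPBmax]
            rw [if_pos (by rw [hpval]; omega), hpval, PySem.List.pyGet?_natCast, Option.map_some]
            rw [List.getElem?_eq_getElem hmbn]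
            congr 1
            rw [pvSvD, List.getD_eq_getElem _ 0 hmbn]
          | none =>
            have hpval : pvPB order (j+1) (pvRho order j) = -1 := by
              rw [pvPB, hPBmax]
            rw [if_neg (by rw [hpval]; omega), Option.map_none]
        have hsv : (if pvSA order (j+1) (pvRho order j) < PySem.List.len (pvSv order)
              then PySem.List.pyGet? (pvSv order) (pvSA order (j+1) (pvRho order j)) else none) =
            pvSuccV (order.take j) (order.getD j 0) := by
          rw [hx, pvSuccV_rank order j (pvRho order j) (by omega) hr0n (hx ▸ hdup),
            ← pvFilter_above_succ order j]
          cases hSAmin : ((pvRem order (j+1)).filter (fun a => pvRho order j < a)).min? with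
          | some ms =>
            have hmem := List.min?_mem hSAmin
            have hmsn : ms < (pvSv order).length :=
              (pvMem_rem order (j+1) (by omega) ms (List.mem_filter.mp hmem).1).1
            have hsval : pvSA order (j+1) (pvRho order j) = ((ms : Nat) : Int) := by
              rw [pvSA, hSAmin]
            rw [if_pos (by rw [hsval, PySem.List.len_eq]; exact_mod_cast hmsn), hsval,
              PySem.List.pyGet?_natCast, Option.map_some]
            rw [List.getElem?_eq_getElem hmsn]
            congr 1
            rw [pvSvD, List.getD_eq_getElem _ 0 hmsn]
          | none =>
            have hsval : pvSA order (j+1) (pvRho order j) =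
                (((pvSv order).length : Nat) : Int) := by
              rw [pvSA, hSAmin]
            rw [if_neg (by rw [hsval, PySem.List.len_eq]; omega), Option.map_none]
        rw [PySem.Dict.get?_insert_self, hpv, hsv]
      · have hne : ((j : Nat) : Int) ≠ ((t : Nat) : Int) := by
          intro h
          exact hjt (by exact_mod_cast h)
        rw [PySem.Dict.get?_insert_of_ne (hne := hne)]
        exact hnbr j (by omega) hjn

lemma pvG_inv (order : List Int) :
    ∀ m t, t + m = order.length → pvInv order t (pvG order t) := by
  intro m
  induction m with
  | zero =>
    intro t h
    have : t = order.length := by omega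
    subst this
    rw [pvG_base]
    exact pvInv_init order
  | succ m ih =>
    intro t h
    have ht : t < order.length := by omega
    rw [pvG_succ order t ht]
    exact pvStep_inv order t ht _ (ih (t+1) (by omega))

def pvAbsAt (order : List Int) (t : Nat) : List Int × PySem.Dict Int Int × Int :=
  (order.take t).foldl pvAbsStep ([], PySem.Dict.empty, 0)

lemma pvAbsFold_fst (suf : List Int) : ∀ (pre : List Int) (d : PySem.Dict Int Int) (m : Int),
    (suf.foldl pvAbsStep (pre, d, m)).1 = pre ++ suf := by
  induction suf with
  | nil => intro pre d m; simp
  | cons x suf' ih =>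
    intro pre d m
    rw [List.foldl_cons]
    have : pvAbsStep (pre, d, m) x =
        (pre ++ [x], (pvAbsStep (pre, d, m) x).2.1, (pvAbsStep (pre, d, m) x).2.2) := rfl
    rw [this, ih]
    simp

lemma pvAbsAt_fst (order : List Int) (t : Nat) : (pvAbsAt order t).1 = order.take t := by
  rw [pvAbsAt, pvAbsFold_fst]
  rfl

lemma pvAbsAt_succ (order : List Int) (t : Nat) (ht : t < order.length) :
    pvAbsAt order (t+1) = pvAbsStep (pvAbsAt order t) (order.getD t 0) := by
  rw [pvAbsAt, pvAbsAt, List.take_succ, List.getElem?_eq_getElem ht]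
  rw [List.foldl_append]
  simp only [Option.toList_some, List.foldl_cons, List.foldl_nil]
  rw [List.getD_eq_getElem order 0 ht]

lemma pvFwd (order : List Int) (nbr : PySem.Dict Int (Option Int × Option Int))
    (hnbr : ∀ j, 1 ≤ j → j < order.length → nbr.get? ((j : Nat) : Int) =
      some (pvPredV (order.take j) (order.getD j 0), pvSuccV (order.take j) (order.getD j 0))) :
    ∀ m t, t + m = order.length → 1 ≤ t →
    (((PySem.List.pyRange ((t : Nat) : Int) (PySem.List.len order) 1).map
        (fun j => (j, PySem.List.pyGetD order j 0))).foldl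
      (fun st jx => stepFwd_maxDepthBST nbr st jx.1 jx.2)
      ((pvAbsAt order t).2.1, (pvAbsAt order t).2.2)) =
    ((pvAbsAt order order.length).2.1, (pvAbsAt order order.length).2.2) := by
  intro m
  induction m with
  | zero =>
    intro t h _
    have : t = order.length := by omega
    subst this
    rw [PySem.List.pyRange_one_eq_nil (by rw [PySem.List.len_eq])]
    rfl
  | succ m ih =>
    intro t h h1
    have ht : t < order.length := by omega
    have hcons : PySem.List.pyRange ((t : Nat) : Int) (PySem.List.len order) 1 =
        ((t : Nat) : Int) :: PySem.List.pyRange (((t+1) : Nat) : Int) (PySem.List.len order) 1 := by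
      rw [PySem.List.pyRange_one_cons (by rw [PySem.List.len_eq]; exact_mod_cast ht)]
      congr 1
    rw [hcons, List.map_cons, List.foldl_cons]
    have hgetD : nbr.getD ((t : Nat) : Int) (none, none) =
        (pvPredV (order.take t) (order.getD t 0), pvSuccV (order.take t) (order.getD t 0)) := by
      rw [PySem.Dict.getD_eq_get?_getD, hnbr t h1 ht]
      rfl
    have hstep : stepFwd_maxDepthBST nbr ((pvAbsAt order t).2.1, (pvAbsAt order t).2.2)
        ((t : Nat) : Int) (PySem.List.pyGetD order ((t : Nat) : Int) 0) =
        ((pvAbsAt order (t+1)).2.1, (pvAbsAt order (t+1)).2.2) := by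
      rw [pvAbsAt_succ order t ht, PySem.List.pyGetD_natCast]
      simp only [stepFwd_maxDepthBST, pvAbsStep, hgetD, pvAbsAt_fst]
    rw [hstep]
    exact ih (t+1) (by omega) (by omega)

lemma pvAlt_unfold (order : List Int) (hne : order ≠ []) :
    maxDepthBST_alt order =
      ((PySem.List.pyRange 1 (PySem.List.len order) 1).foldl
        (fun st j => stepFwd_maxDepthBST
          ((PySem.List.pyRange ((PySem.List.len order) - 1) 0 (-1)).foldl
            (fun st j => stepRev_maxDepthBST (pvSv order) (pvRank order) (pvFirst order)
              (PySem.List.len (pvSv order)) st j (PySem.List.pyGetD order j 0))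
            (pvPrev0 order, pvNxt0 order, PySem.Dict.empty)).2.2
          st j (PySem.List.pyGetD order j 0))
        (PySem.Dict.empty.insert (PySem.List.pyGetD order 0 0) 1, 1)).2 := by
  unfold maxDepthBST_alt
  rw [if_neg hne]
  rfl

lemma pvRev_fold (order : List Int) :
    (PySem.List.pyRange ((PySem.List.len order) - 1) 0 (-1)).foldl
      (fun st j => stepRev_maxDepthBST (pvSv order) (pvRank order) (pvFirst order)
        (PySem.List.len (pvSv order)) st j (PySem.List.pyGetD order j 0))
      (pvPrev0 order, pvNxt0 order, PySem.Dict.empty) = pvG order 1 := by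
  rw [PySem.List.pyRange_neg_one_eq_reverse]
  have h1 : ((0 : Int) + 1) = (((1 : Nat) : Nat) : Int) := by norm_num
  have h2 : (PySem.List.len order - 1 + 1) = PySem.List.len order := by omega
  rw [h1, h2, pvG, ← List.map_reverse, List.foldl_map]

lemma pvB_eq_abs (order : List Int) (hne : order ≠ []) :
    maxDepthBST_alt order = (order.foldl pvAbsStep ([], PySem.Dict.empty, 0)).2.2 := by
  have hlen1 : 1 ≤ order.length := by
    cases order with
    | nil => exact absurd rfl hne
    | cons y l => simp
  rw [pvAlt_unfold order hne, pvRev_fold order]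
  have hinv := pvG_inv order (order.length - 1) 1 (by omega)
  have hnbr := hinv.2.2.2
  have hinit : (PySem.Dict.empty.insert (PySem.List.pyGetD order 0 0) 1, (1 : Int)) =
      ((pvAbsAt order 1).2.1, (pvAbsAt order 1).2.2) := by
    cases order with
    | nil => exact absurd rfl hne
    | cons y l =>
      have h0 : PySem.List.pyGetD (y :: l) 0 0 = y := by
        rw [PySem.List.pyGetD_ofNat']
        rfl
      rw [h0]
      have htake : (y :: l).take 1 = [y] := rfl
      simp only [pvAbsAt]
      rw [htake]
      simp only [List.foldl_cons, List.foldl_nil]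
      have habs : pvAbsStep ([], PySem.Dict.empty, 0) y =
          ([y], PySem.Dict.empty.insert y 1, 1) := by
        simp [pvAbsStep, pvPredV, pvSuccV]
      rw [habs]
  have hfold : (PySem.List.pyRange 1 (PySem.List.len order) 1).foldl
      (fun st j => stepFwd_maxDepthBST (pvG order 1).2.2 st j (PySem.List.pyGetD order j 0))
      ((pvAbsAt order 1).2.1, (pvAbsAt order 1).2.2) =
      ((pvAbsAt order order.length).2.1, (pvAbsAt order order.length).2.2) := by
    have hcast : (1 : Int) = (((1 : Nat) : Nat) : Int) := by norm_num
    rw [hcast, ← List.foldl_map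
      (f := fun j => (j, PySem.List.pyGetD order j 0))
      (g := fun st (jx : Int × Int) => stepFwd_maxDepthBST (pvG order 1).2.2 st jx.1 jx.2)]
    exact pvFwd order (pvG order 1).2.2 hnbr (order.length - 1) 1 (by omega) (by omega)
  rw [hinit, hfold, pvAbsAt, List.take_length]

-- ===== VERDICT (by name: the statement is the Claim_ definition above) =====
theorem maxDepthBST_spec : Claim_equal_maxDepthBST := by
  intro order _
  unfold Spec_maxDepthBST
  by_cases hne : order = []
  · subst hne
    rfl
  · rw [pvA_eq_abs order hne, pvB_eq_abs order hne]
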